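-- pv_equiv track=rewrite | github.com/sheerif/Actions-techniques | PoseModule.py | get_roi_in_front_of_hands
-- ===== SOURCE A (Python) =====
-- def get_roi_in_front_of_hands(landmarks, margin=70, forward_margin=120):
--     """
--     Définir une zone englobante devant les mains (poignets).
--     margin : marge autour des mains
--     forward_margin : distance supplémentaire vers l'avant des mains
--     """
--     # Landmarks des coudes et poignets
--     arm_landmarks_ids = [13, 14, 15, 16]
--
--     # Récupérer les coordonnées X, Y des coudes et poignets
--     x_coords = [lm[1] for lm in landmarks if lm[0] in arm_landmarks_ids]
--     y_coords = [lm[2] for lm in landmarks if lm[0] in arm_landmarks_ids]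
--
--     # Définir les limites de la zone englobante (bounding box) autour des bras et mains
--     x_min, x_max = min(x_coords) - margin, max(x_coords) + margin
--     y_min, y_max = min(y_coords) - margin, max(y_coords) + margin
--
--     # Étendre la zone vers l'avant des mains en ajoutant un forward_margin à x_max
--     x_max += forward_margin
--
--     return x_min, y_min, x_max, y_max
-- ===== SOURCE B (Python) =====
-- def get_roi_in_front_of_hands(landmarks, margin=70, forward_margin=120):
--     """Bounding box around elbows/wrists, extended forward past the hands."""
--     ARM_IDS = (13, 14, 15, 16)
--     extremes = None  # x_min, y_min, x_max, y_max over matching landmarks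
--     for lm in landmarks:
--         if lm[0] in ARM_IDS:
--             x, y = lm[1], lm[2]
--             if extremes is None:
--                 extremes = [x, y, x, y]
--             else:
--                 if x < extremes[0]:
--                     extremes[0] = x
--                 if y < extremes[1]:
--                     extremes[1] = y
--                 if x > extremes[2]:
--                     extremes[2] = x
--                 if y > extremes[3]:
--                     extremes[3] = y
--     if extremes is None:
--         raise ValueError("no arm landmarks (ids 13-16) found")
--     x_min, y_min, x_max, y_max = extremes
--     return (x_min - margin, y_min - margin,
--             x_max + margin + forward_margin, y_max + margin)
-- ===== Notes on version B (the rewrite author's own statement) =====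
-- stated objective: alternative
-- what changed: One streaming pass maintaining the four running extremes (seeded from the first arm landmark) replaces building two coordinate lists and scanning them four times with min/max; Pre_ excludes inputs with no arm landmark, where both implementations raise ValueError.
import Mathlib
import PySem

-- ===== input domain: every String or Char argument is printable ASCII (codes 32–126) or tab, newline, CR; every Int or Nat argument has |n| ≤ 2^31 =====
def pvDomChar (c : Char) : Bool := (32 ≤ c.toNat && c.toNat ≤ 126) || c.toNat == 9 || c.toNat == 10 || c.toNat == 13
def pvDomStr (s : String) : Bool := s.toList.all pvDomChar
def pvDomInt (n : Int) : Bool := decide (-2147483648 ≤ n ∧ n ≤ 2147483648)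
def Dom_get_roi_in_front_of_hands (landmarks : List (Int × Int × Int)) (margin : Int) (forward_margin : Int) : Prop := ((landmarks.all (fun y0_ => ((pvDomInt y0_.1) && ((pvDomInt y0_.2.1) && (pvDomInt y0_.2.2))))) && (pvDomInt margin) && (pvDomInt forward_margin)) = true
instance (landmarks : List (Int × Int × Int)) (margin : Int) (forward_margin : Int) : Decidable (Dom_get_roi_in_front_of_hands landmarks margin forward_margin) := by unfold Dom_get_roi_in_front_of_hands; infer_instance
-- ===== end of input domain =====

-- B replaces the two comprehensions plus four min/max scans by one streaming pass
-- maintaining the four running extremes (objective: alternative decomposition).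
-- Pre_ excludes inputs with no landmark whose id is in {13,14,15,16}: there both
-- Pythons raise ValueError (A via min([]), B via its own emptiness check).


-- ===== PORT A =====
def get_roi_in_front_of_hands (landmarks : List (Int × Int × Int)) (margin : Int) (forward_margin : Int) : Int × Int × Int × Int :=
  let arm_landmarks_ids : List Int := [13, 14, 15, 16]
  let x_coords := (landmarks.filter (fun lm => arm_landmarks_ids.contains lm.1)).map (fun lm => lm.2.1)
  let y_coords := (landmarks.filter (fun lm => arm_landmarks_ids.contains lm.1)).map (fun lm => lm.2.2)
  -- min/max of an empty list raise ValueError in Python: excluded by Pre_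
  let x_min := (PySem.List.min? x_coords (fun y => y)).getD 0 - margin
  let x_max := (PySem.List.max? x_coords (fun y => y)).getD 0 + margin
  let y_min := (PySem.List.min? y_coords (fun y => y)).getD 0 - margin
  let y_max := (PySem.List.max? y_coords (fun y => y)).getD 0 + margin
  (x_min, y_min, x_max + forward_margin, y_max)

-- ===== PORT B =====
def roiStep (st : Option (Int × Int × Int × Int)) (lm : Int × Int × Int) : Option (Int × Int × Int × Int) :=
  if ([13, 14, 15, 16] : List Int).contains lm.1 then
    match st with
    | none => some (lm.2.1, lm.2.2, lm.2.1, lm.2.2)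
    | some (xmn, ymn, xmx, ymx) =>
        some (min xmn lm.2.1, min ymn lm.2.2, max xmx lm.2.1, max ymx lm.2.2)
  else st

def get_roi_in_front_of_hands_alt (landmarks : List (Int × Int × Int)) (margin : Int) (forward_margin : Int) : Int × Int × Int × Int :=
  match landmarks.foldl roiStep none with
  | none => (0, 0, 0, 0)  -- Source B raises ValueError here; excluded by Pre_
  | some (xmn, ymn, xmx, ymx) =>
      (xmn - margin, ymn - margin, xmx + margin + forward_margin, ymx + margin)

-- ===== PRECONDITION & SPEC =====
-- Pre_ excludes exactly the inputs with no landmark whose id is 13/14/15/16: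
-- there A raises ValueError (min of empty list), and B raises ValueError too.
def Pre_get_roi_in_front_of_hands (landmarks : List (Int × Int × Int)) (margin : Int) (forward_margin : Int) : Prop :=
  ∃ lm ∈ landmarks, lm.1 ∈ ([13, 14, 15, 16] : List Int)
instance (landmarks : List (Int × Int × Int)) (margin : Int) (forward_margin : Int) : Decidable (Pre_get_roi_in_front_of_hands landmarks margin forward_margin) := by unfold Pre_get_roi_in_front_of_hands; infer_instance

def pvWitness_get_roi_in_front_of_hands : (List (Int × Int × Int)) × Int × Int :=
  ([(13, 5, 6), (15, -2, 9), (1, 100, 100)], 3, 7)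

def Spec_get_roi_in_front_of_hands (landmarks : List (Int × Int × Int)) (margin : Int) (forward_margin : Int) (out : Int × Int × Int × Int) : Prop := out = get_roi_in_front_of_hands_alt landmarks margin forward_margin
instance (landmarks : List (Int × Int × Int)) (margin : Int) (forward_margin : Int) (out : Int × Int × Int × Int) : Decidable (Spec_get_roi_in_front_of_hands landmarks margin forward_margin out) := by unfold Spec_get_roi_in_front_of_hands; infer_instance

-- ===== CLAIM (what is proved, stated in full; the proofs are below) =====
def Claim_equal_get_roi_in_front_of_hands : Prop := ∀ (landmarks : List (Int × Int × Int)) (margin : Int) (forward_margin : Int), Dom_get_roi_in_front_of_hands landmarks margin forward_margin → Pre_get_roi_in_front_of_hands landmarks margin forward_margin → Spec_get_roi_in_front_of_hands landmarks margin forward_margin (get_roi_in_front_of_hands landmarks margin forward_margin)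

-- ===== LEMMAS AND PROOFS =====
-- Once the accumulator is seeded, B's fold computes the running min/max over the
-- coordinates of the remaining matching landmarks.
theorem roi_fold_some (l : List (Int × Int × Int)) :
    ∀ (a b c d : Int),
      l.foldl roiStep (some (a, b, c, d)) =
        some (((l.filter (fun lm => ([13,14,15,16] : List Int).contains lm.1)).map (fun lm => lm.2.1)).foldl min a,
              ((l.filter (fun lm => ([13,14,15,16] : List Int).contains lm.1)).map (fun lm => lm.2.2)).foldl min b,
              ((l.filter (fun lm => ([13,14,15,16] : List Int).contains lm.1)).map (fun lm => lm.2.1)).foldl max c,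
              ((l.filter (fun lm => ([13,14,15,16] : List Int).contains lm.1)).map (fun lm => lm.2.2)).foldl max d) := by
  induction l with
  | nil => intro a b c d; simp
  | cons lm t ih =>
      intro a b c d
      by_cases h : lm.1 = 13 ∨ lm.1 = 14 ∨ lm.1 = 15 ∨ lm.1 = 16
      · simp [roiStep, h, List.filter_cons, ih]
      · simp [roiStep, h, List.filter_cons, ih]

-- ===== VERDICT (by name: the statement is the Claim_ definition above) =====
theorem get_roi_in_front_of_hands_spec : Claim_equal_get_roi_in_front_of_hands := by
  intro landmarks margin forward_margin hdom hpre
  clear hdom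
  unfold Spec_get_roi_in_front_of_hands
  induction landmarks with
  | nil => simp [Pre_get_roi_in_front_of_hands] at hpre
  | cons lm t ih =>
      by_cases h : ([13,14,15,16] : List Int).contains lm.1
      · simp only [get_roi_in_front_of_hands, get_roi_in_front_of_hands_alt,
          List.foldl_cons, roiStep, h, if_pos, List.filter_cons_of_pos, List.map_cons,
          PySem.List.min?_id_cons, PySem.List.max?_id_cons, roi_fold_some, Option.getD_some]
      · have hpre' : Pre_get_roi_in_front_of_hands t margin forward_margin := by
          obtain ⟨x, hx, hmem⟩ := hpre
          rcases List.mem_cons.mp hx with rfl | hxt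
          · exact absurd (by simpa using hmem) (by simpa using h)
          · exact ⟨x, hxt, hmem⟩
        have h' : ¬ (lm.1 = 13 ∨ lm.1 = 14 ∨ lm.1 = 15 ∨ lm.1 = 16) := by
          simpa [List.contains_eq_mem] using h
        have := ih hpre'
        simpa [get_roi_in_front_of_hands, get_roi_in_front_of_hands_alt,
          List.foldl_cons, roiStep, h, h', List.filter_cons] using this
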